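-- pv_equiv track=rewrite | github.com/onooff/algorithm | boj/bj20950.py | dfs
-- ===== SOURCE A (Python) =====
-- def dfs(colors, target_color, idx, n, cur_color, diff):
--     if n >= 2:
--         tmp = 0
--         for i in range(3):
--             tmp += abs(cur_color[i]//n-target_color[i])
--         diff = min(diff, tmp)
--     if n >= 7:
--         return diff
--     for i in range(idx, len(colors)):
--         cur_color[0], cur_color[1], cur_color[2] = cur_color[0] + \
--             colors[i][0], cur_color[1]+colors[i][1], cur_color[2]+colors[i][2]
--         diff = min(diff, dfs(colors, target_color, i+1, n+1, cur_color, diff))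
--         cur_color[0], cur_color[1], cur_color[2] = cur_color[0] - \
--             colors[i][0], cur_color[1]-colors[i][1], cur_color[2]-colors[i][2]
--     return diff
-- ===== SOURCE B (Python) =====
-- def _combinations(items, s):
--     """All length-s ascending-index combinations of items (any sequence), as lists."""
--     if s == 0:
--         return [[]]
--     if not items:
--         return []
--     head, rest = items[0], items[1:]
--     return [[head] + c for c in _combinations(rest, s - 1)] + _combinations(rest, s)
--
--
-- def dfs(colors, target_color, idx, n, cur_color, diff):
--     indices = range(idx, len(colors))  # lazy: len() and slicing are O(1)
--     hi = min(7 - n, len(indices))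
--     if hi < 0:
--         hi = 0
--     best = diff
--     for s in range(0, hi + 1):
--         if n + s < 2:
--             continue
--         k = n + s
--         for comb in _combinations(indices, s):
--             t = 0
--             for c in range(3):
--                 total = cur_color[c]
--                 for i in comb:
--                     total += colors[i][c]
--                 t += abs(total // k - target_color[c])
--             if t < best:
--                 best = t
--     return best
-- ===== Notes on version B (the rewrite author's own statement) =====
-- stated objective: alternative
-- what changed: Replaces the mutating backtracking DFS with a direct enumeration: for each extra-pick size s up to min(7-n, remaining indices), generate all index combinations with a structural combinations helper and compute each candidate's per-channel sums and distance from scratch; cur_color is never mutated.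
import Mathlib
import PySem

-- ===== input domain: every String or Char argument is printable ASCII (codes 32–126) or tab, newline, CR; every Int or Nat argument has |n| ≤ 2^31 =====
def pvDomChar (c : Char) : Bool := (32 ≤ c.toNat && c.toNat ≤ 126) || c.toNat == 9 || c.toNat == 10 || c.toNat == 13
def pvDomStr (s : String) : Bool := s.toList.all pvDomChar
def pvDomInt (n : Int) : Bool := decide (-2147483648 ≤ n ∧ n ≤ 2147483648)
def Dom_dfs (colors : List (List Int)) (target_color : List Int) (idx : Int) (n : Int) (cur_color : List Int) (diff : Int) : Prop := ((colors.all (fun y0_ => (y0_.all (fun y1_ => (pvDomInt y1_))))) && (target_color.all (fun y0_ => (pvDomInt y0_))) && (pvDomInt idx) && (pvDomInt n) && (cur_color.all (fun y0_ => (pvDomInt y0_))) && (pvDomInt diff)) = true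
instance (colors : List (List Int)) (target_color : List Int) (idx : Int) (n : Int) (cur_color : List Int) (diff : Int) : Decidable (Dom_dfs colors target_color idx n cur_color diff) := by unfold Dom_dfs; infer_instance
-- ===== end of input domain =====

-- B replaces the mutating backtracking DFS by direct size-by-size enumeration of index
-- combinations, computing each candidate from scratch (objective: alternative decomposition).
-- Return-value equivalence only: Python A temporarily mutates cur_color but restores it
-- before returning, so the caller observes no net mutation; B never mutates.

-- ===== PORT A =====
-- xs[i] (Python indexing, negative from the end); total with default 0 / [] — exact under
-- Pre_dfs, which puts every actually-performed access in range.
def pvG (l : List Int) (i : Int) : Int := (PySem.List.pyGet? l i).getD 0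
def pvRow (colors : List (List Int)) (i : Int) : List Int := (PySem.List.pyGet? colors i).getD []
-- A's "tmp" loop: for i in range(3): tmp += abs(cur[i]//n - target[i])
def pvTmp (cur target : List Int) (n : Int) : Int :=
  (PySem.List.pyRange 0 3 1).foldl
    (fun t i => t + |PySem.Int.floordiv (pvG cur i) n - pvG target i|) 0
-- the simultaneous assignment cur[0],cur[1],cur[2] = cur[0]+r[0], cur[1]+r[1], cur[2]+r[2]
def pvAdd3 (cur r : List Int) : List Int :=
  ((cur.set 0 (pvG cur 0 + pvG r 0)).set 1 (pvG cur 1 + pvG r 1)).set 2 (pvG cur 2 + pvG r 2)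

-- fuel = (7 - n).toNat at every call (the recursion bottoms out when n ≥ 7, so the fuel-0
-- branch is unreachable from dfs); otherwise a line-for-line transliteration of A.
def dfsGo (colors : List (List Int)) (target : List Int) :
    Nat → Int → Int → List Int → Int → Int
  | fuel, idx, n, cur, diff =>
    let diff1 := if 2 ≤ n then min diff (pvTmp cur target n) else diff
    if 7 ≤ n then diff1
    else
      match fuel with
      | 0 => diff1
      | f + 1 =>
        (PySem.List.pyRange idx (colors.length : Int) 1).foldl
          (fun d i =>
            min d (dfsGo colors target f (i + 1) (n + 1) (pvAdd3 cur (pvRow colors i)) d))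
          diff1

def dfs (colors : List (List Int)) (target_color : List Int) (idx : Int) (n : Int) (cur_color : List Int) (diff : Int) : Int :=
  dfsGo colors target_color (7 - n).toNat idx n cur_color diff

-- ===== PORT B =====
-- Source B's _combinations(items, s): structural recursion on items
def combs : List Int → Nat → List (List Int)
  | _, 0 => [[]]
  | [], _ + 1 => []
  | h :: rest, s + 1 => ((combs rest s).map (fun c => h :: c)) ++ combs rest (s + 1)

def dfs_alt (colors : List (List Int)) (target_color : List Int) (idx : Int) (n : Int) (cur_color : List Int) (diff : Int) : Int :=
  let indices := PySem.List.pyRange idx (colors.length : Int) 1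
  let hi0 := min (7 - n) (indices.length : Int)
  let hi := if hi0 < 0 then 0 else hi0
  (PySem.List.pyRange 0 (hi + 1) 1).foldl
    (fun best s =>
      if n + s < 2 then best
      else
        (combs indices s.toNat).foldl
          (fun best comb =>
            let t :=
              (PySem.List.pyRange 0 3 1).foldl
                (fun t c =>
                  t + |PySem.Int.floordiv
                        (pvG cur_color c + comb.foldl (fun tot i => tot + pvG (pvRow colors i) c) 0)
                        (n + s) - pvG target_color c|) 0
            if t < best then t else best)
          best)
    diff

-- ===== PRECONDITION & SPEC =====
-- Exactly the inputs on which Python A returns normally; outside it A raises IndexError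
-- (reading channels 0..2 of cur_color/target_color where it evaluates them, reading a
-- visited row of colors that is shorter than 3, or colors[idx] when idx < -len(colors)).
def Pre_dfs (colors : List (List Int)) (target_color : List Int) (idx : Int) (n : Int) (cur_color : List Int) (diff : Int) : Prop :=
  (2 ≤ n → 3 ≤ cur_color.length ∧ 3 ≤ target_color.length) ∧
  (n < 7 →
    (idx < (colors.length : Int) → -(colors.length : Int) ≤ idx ∧ 3 ≤ cur_color.length) ∧
    (2 - n ≤ (colors.length : Int) - idx → 3 ≤ target_color.length) ∧
    (∀ j : Nat, j < colors.length → idx ≤ (j : Int) → 3 ≤ (colors.getD j []).length))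
instance (colors : List (List Int)) (target_color : List Int) (idx : Int) (n : Int) (cur_color : List Int) (diff : Int) : Decidable (Pre_dfs colors target_color idx n cur_color diff) := by unfold Pre_dfs; infer_instance

def pvWitness_dfs : List (List Int) × List Int × Int × Int × List Int × Int :=
  ([[1, 2, 3]], [0, 0, 0], 0, 0, [0, 0, 0], 100)

def Spec_dfs (colors : List (List Int)) (target_color : List Int) (idx : Int) (n : Int) (cur_color : List Int) (diff : Int) (out : Int) : Prop := out = dfs_alt colors target_color idx n cur_color diff
instance (colors : List (List Int)) (target_color : List Int) (idx : Int) (n : Int) (cur_color : List Int) (diff : Int) (out : Int) : Decidable (Spec_dfs colors target_color idx n cur_color diff out) := by unfold Spec_dfs; infer_instance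

-- ===== CLAIM (what is proved, stated in full; the proofs are below) =====
def Claim_equal_dfs : Prop := ∀ (colors : List (List Int)) (target_color : List Int) (idx : Int) (n : Int) (cur_color : List Int) (diff : Int), Dom_dfs colors target_color idx n cur_color diff → Pre_dfs colors target_color idx n cur_color diff → Spec_dfs colors target_color idx n cur_color diff (dfs colors target_color idx n cur_color diff)

-- ===== LEMMAS AND PROOFS =====

-- min-fold
def mins (d : Int) (l : List Int) : Int := l.foldl min d

-- the value of a candidate subset T of indices: per-channel sums of cur plus the rows of T,
-- floor-divided by n + |T|, absolute distance to target, summed over the three channels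
def pvSum (colors : List (List Int)) (cur : List Int) (T : List Int) (c : Int) : Int :=
  pvG cur c + (T.map (fun i => pvG (pvRow colors i) c)).sum

def pvVal (colors : List (List Int)) (target cur : List Int) (n : Int) (T : List Int) : Int :=
  |PySem.Int.floordiv (pvSum colors cur T 0) (n + T.length) - pvG target 0| +
  |PySem.Int.floordiv (pvSum colors cur T 1) (n + T.length) - pvG target 1| +
  |PySem.Int.floordiv (pvSum colors cur T 2) (n + T.length) - pvG target 2|

def candVals (colors : List (List Int)) (target cur : List Int) (n : Int)
    (ts : List (List Int)) : List Int :=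
  (ts.filter (fun T => decide (2 ≤ n + (T.length : Int)))).map (pvVal colors target cur n)

-- the subsets A's DFS enumerates, in its order: subA b is = [] then all nonempty subsets
-- with at most b+? extras; loopA b is = the nonempty subsets picked by the loop, child budget b
mutual
def subA (b : Nat) (is : List Int) : List (List Int) :=
  match b, is with
  | 0, _ => [[]]
  | b + 1, is => [] :: loopA b is
termination_by ((b, 0) : Nat × Nat)
def loopA (b : Nat) (is : List Int) : List (List Int) :=
  match b, is with
  | _, [] => []
  | b, i :: rest => ((subA b rest).map (fun T => i :: T)) ++ loopA b rest
termination_by ((b, is.length) : Nat × Nat)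
end

theorem mins_append (d : Int) (l1 l2 : List Int) : mins d (l1 ++ l2) = mins (mins d l1) l2 := by
  simp [mins, List.foldl_append]

theorem mins_le (d : Int) (l : List Int) : mins d l ≤ d := by
  induction l generalizing d with
  | nil => simp [mins]
  | cons a l ih => exact le_trans (ih (min d a)) (min_le_left _ _)

theorem min_mins (d : Int) (l : List Int) : min d (mins d l) = mins d l :=
  min_eq_right (mins_le d l)

theorem mins_perm (d : Int) {l l' : List Int} (h : l.Perm l') : mins d l = mins d l' := by
  unfold mins
  exact @List.Perm.foldl_eq _ _ min _ _ ⟨fun b a a' => by omega⟩ h d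

theorem pyRange3 : PySem.List.pyRange 0 3 1 = [0, 1, 2] := by decide

theorem tmp_eq (colors : List (List Int)) (target cur : List Int) (n : Int) :
    pvTmp cur target n = pvVal colors target cur n [] := by
  simp [pvTmp, pvVal, pvSum, pyRange3, List.foldl]

theorem length_pvAdd3 (cur r : List Int) : (pvAdd3 cur r).length = cur.length := by
  simp [pvAdd3]

theorem pvG_pvAdd3 (cur r : List Int) (h : 3 ≤ cur.length) (c : Int)
    (hc : c = 0 ∨ c = 1 ∨ c = 2) : pvG (pvAdd3 cur r) c = pvG cur c + pvG r c := by
  have h0 : (0 : Nat) < cur.length := by omega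
  have h1 : (1 : Nat) < cur.length := by omega
  have h2 : (2 : Nat) < cur.length := by omega
  rcases hc with rfl | rfl | rfl <;> simp [pvG, pvAdd3, List.length_set, h0, h1, h2]

theorem pvSum_add3 (colors : List (List Int)) (cur : List Int) (h : 3 ≤ cur.length)
    (i : Int) (T : List Int) (c : Int) (hc : c = 0 ∨ c = 1 ∨ c = 2) :
    pvSum colors (pvAdd3 cur (pvRow colors i)) T c = pvSum colors cur (i :: T) c := by
  simp [pvSum, pvG_pvAdd3 cur (pvRow colors i) h c hc, List.map_cons]
  ring

theorem val_add3 (colors : List (List Int)) (target cur : List Int) (h : 3 ≤ cur.length)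
    (i : Int) (n : Int) (T : List Int) :
    pvVal colors target (pvAdd3 cur (pvRow colors i)) (n + 1) T
      = pvVal colors target cur n (i :: T) := by
  have hlen : (n + 1) + (T.length : Int) = n + ((i :: T).length : Int) := by
    simp; ring
  unfold pvVal
  rw [pvSum_add3 colors cur h i T 0 (by norm_num),
      pvSum_add3 colors cur h i T 1 (by norm_num),
      pvSum_add3 colors cur h i T 2 (by norm_num), hlen]

theorem candVals_append (colors : List (List Int)) (target cur : List Int) (n : Int)
    (t1 t2 : List (List Int)) :
    candVals colors target cur n (t1 ++ t2)
      = candVals colors target cur n t1 ++ candVals colors target cur n t2 := by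
  simp [candVals]

theorem candVals_add3 (colors : List (List Int)) (target cur : List Int) (h : 3 ≤ cur.length)
    (i : Int) (n : Int) (ts : List (List Int)) :
    candVals colors target (pvAdd3 cur (pvRow colors i)) (n + 1) ts
      = candVals colors target cur n (ts.map (fun T => i :: T)) := by
  unfold candVals
  rw [List.filter_map, List.map_map]
  have h1 : ((fun T : List Int => decide (2 ≤ n + (T.length : Int))) ∘ (fun T => i :: T))
      = (fun T : List Int => decide (2 ≤ (n + 1) + (T.length : Int))) := by
    funext T
    simp only [Function.comp, List.length_cons]
    exact decide_eq_decide.mpr (by push_cast; omega)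
  rw [h1]
  exact List.map_congr_left (fun T _ => val_add3 colors target cur h i n T)

theorem combs_length {T items : List Int} {s : Nat} (h : T ∈ combs items s) :
    T.length = s := by
  induction items generalizing T s with
  | nil => cases s with
    | zero => simp [combs] at h; simp [h]
    | succ s => simp [combs] at h
  | cons a rest ih =>
    cases s with
    | zero => simp [combs] at h; simp [h]
    | succ s =>
      simp only [combs, List.mem_append, List.mem_map] at h
      rcases h with ⟨c, hc, rfl⟩ | h
      · simp [ih hc]
      · exact ih h

theorem combs_big {items : List Int} {s : Nat} (h : items.length < s) : combs items s = [] := by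
  induction items generalizing s with
  | nil => cases s with
    | zero => simp at h
    | succ s => simp [combs]
  | cons a rest ih =>
    cases s with
    | zero => simp at h
    | succ s =>
      simp at h
      simp [combs, ih (by omega), ih (by omega : rest.length < s + 1)]

theorem candVals_cons_nil (colors : List (List Int)) (target cur : List Int) (n : Int)
    (ts : List (List Int)) :
    candVals colors target cur n ([] :: ts)
      = (if 2 ≤ n then [pvVal colors target cur n []] else []) ++ candVals colors target cur n ts := by
  by_cases h : 2 ≤ n <;> simp [candVals, h]

-- the inner loop of A, characterized against loopA (IH = the fuel induction hypothesis)
theorem loop_char (colors : List (List Int)) (target : List Int) (f : Nat) (n : Int)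
    (IH : ∀ (idx : Int) (cur : List Int), 3 ≤ cur.length → ∀ (diff : Int),
        dfsGo colors target f idx (n + 1) cur diff
          = mins diff (candVals colors target cur (n + 1)
              (subA (7 - (n + 1)).toNat (PySem.List.pyRange idx (colors.length : Int) 1)))) :
    ∀ (m : Nat) (j : Int), ((colors.length : Int) - j).toNat ≤ m →
    ∀ (cur : List Int), 3 ≤ cur.length → ∀ (d : Int),
    (PySem.List.pyRange j (colors.length : Int) 1).foldl
      (fun d i => min d (dfsGo colors target f (i + 1) (n + 1) (pvAdd3 cur (pvRow colors i)) d)) d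
      = mins d (candVals colors target cur n
          (loopA (6 - n).toNat (PySem.List.pyRange j (colors.length : Int) 1))) := by
  intro m
  induction m with
  | zero =>
    intro j hj cur hcur d
    rw [PySem.List.pyRange_one_eq_nil (by omega)]
    simp [loopA, candVals, mins]
  | succ m ih =>
    intro j hj cur hcur d
    by_cases hjL : j < (colors.length : Int)
    · rw [PySem.List.pyRange_one_cons hjL]
      simp only [List.foldl_cons]
      have hrec : min d (dfsGo colors target f (j + 1) (n + 1) (pvAdd3 cur (pvRow colors j)) d)
          = mins d (candVals colors target cur n
              ((subA (6 - n).toNat (PySem.List.pyRange (j + 1) (colors.length : Int) 1)).map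
                (fun T => j :: T))) := by
        rw [IH (j + 1) _ (by rw [length_pvAdd3]; exact hcur) d]
        have h76 : (7 - (n + 1)).toNat = (6 - n).toNat := by omega
        rw [h76, candVals_add3 colors target cur hcur j n, min_mins]
      rw [hrec, ih (j + 1) (by omega) cur hcur, ← mins_append, ← candVals_append]
      rw [loopA]
    · rw [PySem.List.pyRange_one_eq_nil (by omega)]
      simp [loopA, candVals, mins]

-- A characterized
theorem dfsGo_char (colors : List (List Int)) (target : List Int) :
    ∀ (fuel : Nat) (n : Int), (7 - n).toNat ≤ fuel →
    ∀ (idx : Int) (cur : List Int), 3 ≤ cur.length → ∀ (diff : Int),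
    dfsGo colors target fuel idx n cur diff
      = mins diff (candVals colors target cur n
          (subA (7 - n).toNat (PySem.List.pyRange idx (colors.length : Int) 1))) := by
  intro fuel
  induction fuel with
  | zero =>
    intro n hfuel idx cur hcur diff
    have hn : 7 ≤ n := by omega
    have h0 : (7 - n).toNat = 0 := by omega
    rw [dfsGo, h0]
    simp [subA, candVals, hn, (by omega : 2 ≤ n), mins, ← tmp_eq colors target cur n]
  | succ f ih =>
    intro n hfuel idx cur hcur diff
    by_cases hn : 7 ≤ n
    · have h0 : (7 - n).toNat = 0 := by omega
      rw [dfsGo, h0]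
      simp [subA, candVals, hn, (by omega : 2 ≤ n), mins, ← tmp_eq colors target cur n]
    · have hb : (7 - n).toNat = (6 - n).toNat + 1 := by omega
      rw [dfsGo, hb]
      simp only [if_neg hn]
      rw [subA]
      rw [candVals_cons_nil, ← tmp_eq colors target cur n]
      have hIH : ∀ (idx : Int) (cur : List Int), 3 ≤ cur.length → ∀ (diff : Int),
          dfsGo colors target f idx (n + 1) cur diff
            = mins diff (candVals colors target cur (n + 1)
                (subA (7 - (n + 1)).toNat (PySem.List.pyRange idx (colors.length : Int) 1))) :=
        fun idx cur hcur diff => ih (n + 1) (by omega) idx cur hcur diff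
      rw [loop_char colors target f n hIH ((colors.length : Int) - idx).toNat idx (le_refl _) cur hcur]
      by_cases h2 : 2 ≤ n <;> simp [h2, mins]

theorem foldl_mins_flatMap (g : Int → List Int) : ∀ (sl : List Int) (d : Int),
    sl.foldl (fun b s => mins b (g s)) d = mins d (sl.flatMap g) := by
  intro sl
  induction sl with
  | nil => intro d; simp [mins]
  | cons a sl ih => intro d; rw [List.foldl_cons, ih, List.flatMap_cons, mins_append]

theorem candVals_flatMap (colors : List (List Int)) (target cur : List Int) (n : Int)
    (g : Int → List (List Int)) (sl : List Int) :
    sl.flatMap (fun s => candVals colors target cur n (g s))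
      = candVals colors target cur n (sl.flatMap g) := by
  induction sl with
  | nil => simp [candVals]
  | cons a sl ih => rw [List.flatMap_cons, List.flatMap_cons, candVals_append, ih]

theorem inner_val (colors : List (List Int)) (target cur : List Int) (n : Int)
    (comb : List Int) :
    (PySem.List.pyRange 0 3 1).foldl
      (fun t c => t + |PySem.Int.floordiv
            (pvG cur c + comb.foldl (fun tot i => tot + pvG (pvRow colors i) c) 0)
            (n + (comb.length : Int)) - pvG target c|) 0
      = pvVal colors target cur n comb := by
  simp [pyRange3, pvVal, pvSum, PySem.List.foldl_add, List.foldl]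

-- B's per-size loop body equals one mins-step over candVals
theorem alt_body_eq (colors : List (List Int)) (target : List Int) (idx n : Int)
    (cur : List Int) :
    ∀ (acc : Int), ∀ s ∈ PySem.List.pyRange 0
        ((if min (7 - n) (((PySem.List.pyRange idx (colors.length : Int) 1).length : Int)) < 0 then 0
          else min (7 - n) (((PySem.List.pyRange idx (colors.length : Int) 1).length : Int))) + 1) 1,
      (if n + s < 2 then acc
       else
        (combs (PySem.List.pyRange idx (colors.length : Int) 1) s.toNat).foldl
          (fun best comb =>
            let t :=
              (PySem.List.pyRange 0 3 1).foldl
                (fun t c =>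
                  t + |PySem.Int.floordiv
                        (pvG cur c + comb.foldl (fun tot i => tot + pvG (pvRow colors i) c) 0)
                        (n + s) - pvG target c|) 0
            if t < best then t else best)
          acc)
      = mins acc (candVals colors target cur n
          (combs (PySem.List.pyRange idx (colors.length : Int) 1) s.toNat)) := by
  intro acc s hs
  have hs0 : 0 ≤ s := (PySem.List.mem_pyRange_one.mp hs).1
  set is := PySem.List.pyRange idx (colors.length : Int) 1 with his
  by_cases hguard : n + s < 2
  · rw [if_pos hguard]
    have : candVals colors target cur n (combs is s.toNat) = [] := by
      unfold candVals
      rw [List.filter_eq_nil_iff.mpr, List.map_nil]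
      intro T hT
      simp only [decide_eq_true_eq]
      have := combs_length hT
      omega
    rw [this]; rfl
  · rw [if_neg hguard]
    have hkeep : candVals colors target cur n (combs is s.toNat)
        = (combs is s.toNat).map (pvVal colors target cur n) := by
      unfold candVals
      congr 1
      rw [List.filter_eq_self]
      intro T hT
      simp only [decide_eq_true_eq]
      have := combs_length hT
      omega
    rw [hkeep]
    unfold mins
    rw [List.foldl_map]
    apply PySem.List.foldl_congr_mem
    intro b comb hcomb
    have hlen : (comb.length : Int) = s := by
      have := combs_length hcomb
      omega
    simp only []
    rw [← hlen, inner_val colors target cur n comb]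
    omega

-- B characterized
theorem alt_char (colors : List (List Int)) (target : List Int) (idx n : Int)
    (cur : List Int) (diff : Int) :
    dfs_alt colors target idx n cur diff
      = mins diff (candVals colors target cur n
          ((PySem.List.pyRange 0
              ((if min (7 - n) (((PySem.List.pyRange idx (colors.length : Int) 1).length : Int)) < 0 then 0
                else min (7 - n) (((PySem.List.pyRange idx (colors.length : Int) 1).length : Int))) + 1) 1).flatMap
            (fun s => combs (PySem.List.pyRange idx (colors.length : Int) 1) s.toNat))) := by
  unfold dfs_alt
  rw [PySem.List.foldl_congr_mem _ _
        (fun best s => mins best (candVals colors target cur n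
          (combs (PySem.List.pyRange idx (colors.length : Int) 1) s.toNat))) diff
        (alt_body_eq colors target idx n cur)]
  rw [foldl_mins_flatMap
    (fun s => candVals colors target cur n
      (combs (PySem.List.pyRange idx (colors.length : Int) 1) s.toNat)) _ diff]
  rw [candVals_flatMap]

theorem flatMap_append_perm {α β : Type} (l : List α) (f g : α → List β) :
    (l.flatMap (fun x => f x ++ g x)).Perm (l.flatMap f ++ l.flatMap g) := by
  induction l with
  | nil => simp
  | cons a l ih =>
    simp only [List.flatMap_cons]
    refine (List.Perm.append_left _ ih).trans ?_
    simp only [List.append_assoc]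
    exact List.Perm.append_left _ (List.perm_append_comm_assoc _ _ _)

-- dropping size classes beyond the list length changes nothing: those combs are empty
theorem flatMap_range_cap (is : List Int) (b : Nat) :
    (List.range (b + 1)).flatMap (fun s => combs is s)
      = (List.range (min b is.length + 1)).flatMap (fun s => combs is s) := by
  by_cases h : b ≤ is.length
  · rw [min_eq_left h]
  · rw [min_eq_right (by omega : is.length ≤ b)]
    have hsplit : b + 1 = (is.length + 1) + (b - is.length) := by omega
    rw [hsplit, List.range_add, List.flatMap_append]
    have h2 : (List.map (fun x => is.length + 1 + x) (List.range (b - is.length))).flatMap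
        (fun s => combs is s) = [] :=
      List.flatMap_eq_nil_iff.mpr (fun x hx => by
        rcases List.mem_map.mp hx with ⟨k, _, rfl⟩
        exact combs_big (by omega))
    rw [h2, List.append_nil]

-- the permutation between the two enumerations
theorem subA_perm (b : Nat) (is : List Int) :
    (subA b is).Perm ((List.range (b + 1)).flatMap (fun s => combs is s)) := by
  induction b generalizing is with
  | zero => simp [subA, combs]
  | succ b ihP =>
    have Q : ∀ is : List Int,
        (loopA b is).Perm ((List.range (b + 1)).flatMap (fun s => combs is (s + 1))) := by
      intro is
      induction is with
      | nil =>
        have h : (List.range (b + 1)).flatMap (fun s => combs ([] : List Int) (s + 1)) = [] :=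
          List.flatMap_eq_nil_iff.mpr (fun x _ => by simp [combs])
        rw [loopA, h]
      | cons i rest ihQ =>
        rw [loopA]
        refine (((ihP rest).map _).append ihQ).trans ?_
        rw [List.map_flatMap]
        exact (flatMap_append_perm (List.range (b + 1))
          (fun s => (combs rest s).map (fun T => i :: T)) (fun s => combs rest (s + 1))).symm
    cases is with
    | nil =>
      have h : (List.range (b + 1 + 1)).flatMap (fun s => combs ([] : List Int) s) = [[]] := by
        rw [List.range_succ_eq_map]
        simp [combs]
      rw [subA, loopA, h]
    | cons i rest =>
      rw [subA, List.range_succ_eq_map, List.flatMap_cons]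
      have h : (List.map Nat.succ (List.range (b + 1))).flatMap (fun s => combs (i :: rest) s)
          = (List.range (b + 1)).flatMap (fun s => combs (i :: rest) (s + 1)) := by
        rw [List.flatMap_map]
      rw [h]
      exact (Q (i :: rest)).cons []

-- ===== VERDICT (by name: the statement is the Claim_ definition above) =====
theorem dfs_spec : Claim_equal_dfs := by
  intro colors target idx n cur diff hDom hPre
  unfold Spec_dfs
  by_cases h3 : 3 ≤ cur.length
  · unfold dfs
    rw [dfsGo_char colors target (7 - n).toNat n (le_refl _) idx cur h3 diff,
        alt_char colors target idx n cur diff]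
    apply mins_perm
    unfold candVals
    apply List.Perm.map
    apply List.Perm.filter
    set is := PySem.List.pyRange idx (colors.length : Int) 1 with his
    have hsizes : (PySem.List.pyRange 0
          ((if min (7 - n) ((is.length : Int)) < 0 then 0 else min (7 - n) (is.length : Int)) + 1) 1).flatMap
          (fun s => combs is s.toNat)
        = (List.range (min (7 - n).toNat is.length + 1)).flatMap (fun s => combs is s) := by
      rw [PySem.List.pyRange_one, List.flatMap_map]
      have harg : ((if min (7 - n) ((is.length : Int)) < 0 then 0
          else min (7 - n) (is.length : Int)) + 1 - 0).toNat = min (7 - n).toNat is.length + 1 := by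
        omega
      rw [harg]
      simp
    rw [hsizes]
    refine (subA_perm (7 - n).toNat is).trans ?_
    rw [flatMap_range_cap]
  · have hn2 : ¬ 2 ≤ n := fun h => h3 (hPre.1 h).1
    have hn7 : n < 7 := by omega
    have hidx : ¬ idx < (colors.length : Int) := fun hlt => h3 ((hPre.2 hn7).1 hlt).2
    obtain ⟨f, hf⟩ : ∃ f, (7 - n).toNat = f + 1 := ⟨(6 - n).toNat, by omega⟩
    unfold dfs
    rw [hf, dfsGo, PySem.List.pyRange_one_eq_nil (by omega)]
    simp only [if_neg hn2, if_neg (by omega : ¬ 7 ≤ n), List.foldl_nil]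
    rw [alt_char, PySem.List.pyRange_one_eq_nil (by omega : (colors.length : Int) ≤ idx)]
    have h1 : (if min (7 - n) ((([] : List Int).length : Int)) < 0 then (0 : Int)
        else min (7 - n) ((([] : List Int).length : Int))) + 1 = 1 := by
      simp only [List.length_nil, CharP.cast_eq_zero]
      omega
    rw [h1]
    have h2 : PySem.List.pyRange 0 1 1 = [0] := by decide
    rw [h2]
    simp [combs, candVals, mins, hn2]
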